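-- pv_equiv track=rewrite | github.com/jfbucas/carre | carre_jef.py | genLibraryOptimized
-- ===== SOURCE A (Python) =====
-- SAUTS_PER_DEPTH=1
--
-- def genLibraryOptimized( board_w, board_h, LesSauts, result="nb_solutions" ):
--
-- 	def genLibraryOptimized_Aux( nb_sauts, i, j, masque ):
-- 		output = ""
-- 		if (depth + nb_sauts) == (board_w*board_h-1):
-- 			output += "	nb_solutions += ((masque & " + str( masque ).rjust(12," ") + "u ) == 0 ); // "+ "{0:b}".format(masque).rjust(64,"0") +" i="+str(i)+",j="+str(j)+"\n"
--
-- 		elif nb_sauts == SAUTS_PER_DEPTH: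
-- 			output += "	if ((masque & " + str( masque ).rjust(12," ") + "u ) == 0 ) { // "+ "{0:b}".format(masque).rjust(64,"0") +" i="+str(i)+",j="+str(j)+"\n"
-- 			output += "		masque ^= " + str( masque ) + "u;\n"
-- 			output += "		SauteDepuis_" + str(i) + "_" + str(j) +"_" + str(depth+SAUTS_PER_DEPTH) + "();\n"
-- 			output += "		masque ^= " + str( masque ) + "u;\n"
-- 			output += "	}\n"
--
-- 		else:
-- 			for ( sx, sy ) in LesSauts:
-- 				i1 = i + sx
-- 				j1 = j + sy
-- 				if (i1>=0) and (i1<board_w) and (j1>=0) and (j1<board_h):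
-- 					if (masque & (1 << (i1 + j1*board_w))) == 0:
-- 						new_masque = masque | (1 << (i1 + j1*board_w))
-- 						output += genLibraryOptimized_Aux( nb_sauts+1, i1, j1, new_masque )
--
-- 		return output
--
-- 	defs    = "typedef unsigned long long int uint64;\n"
-- 	output  = "uint64 nb_solutions;" + "\n"
-- 	output += "uint64 masque;" + "\n"
-- 	defs   += "void start( uint64 position );" + "\n"
-- 	output += "void start( uint64 position ) {" + "\n"
-- 	output += "	nb_solutions = 0; " + "\n"
-- 	output += "	masque = 0u; " + "\n"
-- 	output += "	switch ( position ) {" + "\n"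
-- 	for j in range(board_h):
-- 		for i in range(board_w):
-- 			output += "		case " + str( i + j*board_w  ) + ":\n"
-- 			output += "			masque ^= " + str( 1 << (i + j*board_w)) +"u;\n" # Mark initial position
-- 			output += "			SauteDepuis_"+ str(i) +"_"+ str(j)+"_0 ();\n"
-- 			output += "			break;\n"
-- 	output += "	}\n"
-- 	output += "}\n\n"
--
-- 	for depth in range(0, board_w*board_h-1, SAUTS_PER_DEPTH):
-- 		for j in range(board_h):
-- 			for i in range(board_w):
-- 				defs   += 'void SauteDepuis_' + str(i) + "_" + str(j) + "_" + str(depth) + "();" + "\n"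
-- 				output += 'void SauteDepuis_' + str(i) + "_" + str(j) + "_" + str(depth) + "() {" + "\n"
-- 				output += genLibraryOptimized_Aux( 0, i, j, 0 )
-- 				output += "}\n\n"
--
-- 	defs += "\n"
--
-- 	return defs + output
-- ===== SOURCE B (Python) =====
-- SAUTS_PER_DEPTH = 1
--
-- def genLibraryOptimized(board_w, board_h, LesSauts, result="nb_solutions"):
--     # Flat, non-recursive generation: the one-level recursion of the original is
--     # replaced by a direct per-cell snippet builder, and defs/start/functions are
--     # produced in three independent passes joined at the end.
--     N = board_w * board_h
--     cells = [(i, j) for j in range(board_h) for i in range(board_w)]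
--
--     def body(depth, i, j):
--         parts = []
--         for (sx, sy) in LesSauts:
--             i1 = i + sx
--             j1 = j + sy
--             if 0 <= i1 < board_w and 0 <= j1 < board_h:
--                 m = 1 << (i1 + j1 * board_w)
--                 head = ("masque & " + str(m).rjust(12, " ") + "u ) == 0 "
--                         + ("); // " if depth + 1 == N - 1 else ") { // ")
--                         + "{0:b}".format(m).rjust(64, "0")
--                         + " i=" + str(i1) + ",j=" + str(j1) + "\n")
--                 if depth + 1 == N - 1:
--                     parts.append("\tnb_solutions += ((" + head)
--                 else:
--                     parts.append("\tif ((" + head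
--                                  + "\t\tmasque ^= " + str(m) + "u;\n"
--                                  + "\t\tSauteDepuis_" + str(i1) + "_" + str(j1)
--                                  + "_" + str(depth + 1) + "();\n"
--                                  + "\t\tmasque ^= " + str(m) + "u;\n"
--                                  + "\t}\n")
--         return "".join(parts)
--
--     defs = ("typedef unsigned long long int uint64;\n"
--             + "void start( uint64 position );\n"
--             + "".join("void SauteDepuis_" + str(i) + "_" + str(j) + "_" + str(depth) + "();\n"
--                       for depth in range(N - 1) for (i, j) in cells)
--             + "\n")
--
--     start = ("uint64 nb_solutions;\nuint64 masque;\n"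
--              + "void start( uint64 position ) {\n"
--              + "\tnb_solutions = 0; \n\tmasque = 0u; \n\tswitch ( position ) {\n"
--              + "".join("\t\tcase " + str(i + j * board_w) + ":\n"
--                        + "\t\t\tmasque ^= " + str(1 << (i + j * board_w)) + "u;\n"
--                        + "\t\t\tSauteDepuis_" + str(i) + "_" + str(j) + "_0 ();\n"
--                        + "\t\t\tbreak;\n"
--                        for (i, j) in cells)
--              + "\t}\n}\n\n")
--
--     funcs = "".join("void SauteDepuis_" + str(i) + "_" + str(j) + "_" + str(depth) + "() {\n"
--                     + body(depth, i, j) + "}\n\n"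
--                     for depth in range(N - 1) for (i, j) in cells)
--
--     return defs + start + funcs
-- ===== Notes on version B (the rewrite author's own statement) =====
-- stated objective: alternative
-- what changed: The one-level recursive helper (nb_sauts/masque threading with a mask test against masque=0) is replaced by a flat per-jump snippet builder that computes each bit directly, and the defs/start/function sections are assembled in three independent joined passes instead of two accumulators threaded through one nested loop.
import Mathlib
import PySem

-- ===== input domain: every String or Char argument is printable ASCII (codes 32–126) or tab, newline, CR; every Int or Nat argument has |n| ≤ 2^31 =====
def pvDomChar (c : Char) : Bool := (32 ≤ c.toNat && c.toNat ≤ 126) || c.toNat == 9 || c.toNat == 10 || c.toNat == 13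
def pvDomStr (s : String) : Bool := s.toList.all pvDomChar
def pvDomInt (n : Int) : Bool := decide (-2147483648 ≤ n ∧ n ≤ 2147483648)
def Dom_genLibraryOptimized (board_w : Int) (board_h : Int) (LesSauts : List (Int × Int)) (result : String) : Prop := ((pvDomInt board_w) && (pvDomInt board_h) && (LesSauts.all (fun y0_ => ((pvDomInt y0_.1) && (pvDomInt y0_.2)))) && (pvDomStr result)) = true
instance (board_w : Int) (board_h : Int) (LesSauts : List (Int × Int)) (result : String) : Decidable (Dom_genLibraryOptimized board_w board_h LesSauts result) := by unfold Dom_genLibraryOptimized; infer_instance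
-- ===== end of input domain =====

-- B replaces the one-level recursive helper by a flat per-jump snippet builder (no recursion,
-- no mask threading) and assembles defs/start/functions in three independent joined passes
-- (objective: alternative decomposition, same cost).

-- shared formatting helper: Python's s.rjust(w, c) (exact: left-pads with c when shorter than w)
def pyRjust (s : String) (w : Nat) (c : Char) : String :=
  String.ofList (List.replicate (w - s.toList.length) c ++ s.toList)

-- ===== PORT A =====
-- Literal port of genLibraryOptimized_Aux (SAUTS_PER_DEPTH = 1). The recursion is guarded by
-- fuel, which only makes it total: Python calls it with nb_sauts = 0 and its recursive calls use
-- nb_sauts = 1 and stop, so at the call site (fuel = 2) the fuel-0 guard is unreachable.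
-- `(1 : Int) <<< (…).toNat` is exact: inside the bounds guard the exponent is ≥ 0.
def genAux (board_w : Int) (board_h : Int) (LesSauts : List (Int × Int)) (depth : Int) :
    Nat → Int → Int → Int → Int → String
  | 0, _, _, _, _ => ""
  | fuel+1, nb_sauts, i, j, masque =>
    if depth + nb_sauts = board_w * board_h - 1 then
      "\tnb_solutions += ((masque & " ++ pyRjust (PySem.Int.toStr masque) 12 ' ' ++ "u ) == 0 ); // "
        ++ pyRjust (PySem.Int.toBin masque) 64 '0' ++ " i=" ++ PySem.Int.toStr i ++ ",j=" ++ PySem.Int.toStr j ++ "\n"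
    else if nb_sauts = 1 then
      "\tif ((masque & " ++ pyRjust (PySem.Int.toStr masque) 12 ' ' ++ "u ) == 0 ) { // "
        ++ pyRjust (PySem.Int.toBin masque) 64 '0' ++ " i=" ++ PySem.Int.toStr i ++ ",j=" ++ PySem.Int.toStr j ++ "\n"
      ++ "\t\tmasque ^= " ++ PySem.Int.toStr masque ++ "u;\n"
      ++ "\t\tSauteDepuis_" ++ PySem.Int.toStr i ++ "_" ++ PySem.Int.toStr j ++ "_" ++ PySem.Int.toStr (depth + 1) ++ "();\n"
      ++ "\t\tmasque ^= " ++ PySem.Int.toStr masque ++ "u;\n"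
      ++ "\t}\n"
    else
      LesSauts.foldl (fun output s =>
        if 0 ≤ i + s.1 ∧ i + s.1 < board_w ∧ 0 ≤ j + s.2 ∧ j + s.2 < board_h then
          if PySem.Int.band masque ((1 : Int) <<< ((i + s.1) + (j + s.2) * board_w).toNat) = 0 then
            output ++ genAux board_w board_h LesSauts depth fuel (nb_sauts + 1) (i + s.1) (j + s.2)
              (PySem.Int.bor masque ((1 : Int) <<< ((i + s.1) + (j + s.2) * board_w).toNat))
          else output
        else output) ""

def genLibraryOptimized (board_w : Int) (board_h : Int) (LesSauts : List (Int × Int)) (result : String) : String :=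
  let defs0 := "typedef unsigned long long int uint64;\n"
  let output0 := "uint64 nb_solutions;" ++ "\n"
  let output1 := output0 ++ "uint64 masque;" ++ "\n"
  let defs1 := defs0 ++ "void start( uint64 position );" ++ "\n"
  let output2 := output1 ++ "void start( uint64 position ) {" ++ "\n"
      ++ "\tnb_solutions = 0; " ++ "\n" ++ "\tmasque = 0u; " ++ "\n" ++ "\tswitch ( position ) {" ++ "\n"
  let output3 := (PySem.List.pyRange 0 board_h 1).foldl (fun output j =>
      (PySem.List.pyRange 0 board_w 1).foldl (fun output i =>
        output ++ "\t\tcase " ++ PySem.Int.toStr (i + j * board_w) ++ ":\n"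
          ++ "\t\t\tmasque ^= " ++ PySem.Int.toStr ((1 : Int) <<< (i + j * board_w).toNat) ++ "u;\n"
          ++ "\t\t\tSauteDepuis_" ++ PySem.Int.toStr i ++ "_" ++ PySem.Int.toStr j ++ "_0 ();\n"
          ++ "\t\t\tbreak;\n") output) output2
  let output4 := output3 ++ "\t}\n" ++ "}\n\n"
  let st := (PySem.List.pyRange 0 (board_w * board_h - 1) 1).foldl (fun st depth =>
      (PySem.List.pyRange 0 board_h 1).foldl (fun st j =>
        (PySem.List.pyRange 0 board_w 1).foldl (fun (st : String × String) i =>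
          (st.1 ++ "void SauteDepuis_" ++ PySem.Int.toStr i ++ "_" ++ PySem.Int.toStr j ++ "_" ++ PySem.Int.toStr depth ++ "();" ++ "\n",
           st.2 ++ "void SauteDepuis_" ++ PySem.Int.toStr i ++ "_" ++ PySem.Int.toStr j ++ "_" ++ PySem.Int.toStr depth ++ "() {" ++ "\n"
             ++ genAux board_w board_h LesSauts depth 2 0 i j 0 ++ "}\n\n")) st) st) (defs1, output4)
  (st.1 ++ "\n") ++ st.2

-- ===== PORT B =====
def cellsB (board_w : Int) (board_h : Int) : List (Int × Int) :=
  (PySem.List.pyRange 0 board_h 1).flatMap (fun j => (PySem.List.pyRange 0 board_w 1).map (fun i => (i, j)))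

def bodyB (board_w : Int) (board_h : Int) (LesSauts : List (Int × Int)) (depth : Int) (i : Int) (j : Int) : String :=
  String.join (LesSauts.foldl (fun parts s =>
    if 0 ≤ i + s.1 ∧ i + s.1 < board_w ∧ 0 ≤ j + s.2 ∧ j + s.2 < board_h then
      let m : Int := (1 : Int) <<< ((i + s.1) + (j + s.2) * board_w).toNat
      let head := "masque & " ++ pyRjust (PySem.Int.toStr m) 12 ' ' ++ "u ) == 0 "
        ++ (if depth + 1 = board_w * board_h - 1 then "); // " else ") { // ")
        ++ pyRjust (PySem.Int.toBin m) 64 '0'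
        ++ " i=" ++ PySem.Int.toStr (i + s.1) ++ ",j=" ++ PySem.Int.toStr (j + s.2) ++ "\n"
      if depth + 1 = board_w * board_h - 1 then
        parts ++ ["\tnb_solutions += ((" ++ head]
      else
        parts ++ ["\tif ((" ++ head
          ++ "\t\tmasque ^= " ++ PySem.Int.toStr m ++ "u;\n"
          ++ "\t\tSauteDepuis_" ++ PySem.Int.toStr (i + s.1) ++ "_" ++ PySem.Int.toStr (j + s.2) ++ "_" ++ PySem.Int.toStr (depth + 1) ++ "();\n"
          ++ "\t\tmasque ^= " ++ PySem.Int.toStr m ++ "u;\n"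
          ++ "\t}\n"]
    else parts) [])

def genLibraryOptimized_alt (board_w : Int) (board_h : Int) (LesSauts : List (Int × Int)) (result : String) : String :=
  let cells := cellsB board_w board_h
  let defs := "typedef unsigned long long int uint64;\nvoid start( uint64 position );\n"
      ++ String.join ((PySem.List.pyRange 0 (board_w * board_h - 1) 1).flatMap (fun depth =>
           cells.map (fun c => "void SauteDepuis_" ++ PySem.Int.toStr c.1 ++ "_" ++ PySem.Int.toStr c.2 ++ "_" ++ PySem.Int.toStr depth ++ "();\n")))
      ++ "\n"
  let start := "uint64 nb_solutions;\nuint64 masque;\n" ++ "void start( uint64 position ) {\n"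
      ++ "\tnb_solutions = 0; \n\tmasque = 0u; \n\tswitch ( position ) {\n"
      ++ String.join (cells.map (fun c =>
           "\t\tcase " ++ PySem.Int.toStr (c.1 + c.2 * board_w) ++ ":\n"
           ++ "\t\t\tmasque ^= " ++ PySem.Int.toStr ((1 : Int) <<< (c.1 + c.2 * board_w).toNat) ++ "u;\n"
           ++ "\t\t\tSauteDepuis_" ++ PySem.Int.toStr c.1 ++ "_" ++ PySem.Int.toStr c.2 ++ "_0 ();\n"
           ++ "\t\t\tbreak;\n"))
      ++ "\t}\n}\n\n"
  let funcs := String.join ((PySem.List.pyRange 0 (board_w * board_h - 1) 1).flatMap (fun depth =>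
      cells.map (fun c =>
        "void SauteDepuis_" ++ PySem.Int.toStr c.1 ++ "_" ++ PySem.Int.toStr c.2 ++ "_" ++ PySem.Int.toStr depth ++ "() {\n"
        ++ bodyB board_w board_h LesSauts depth c.1 c.2 ++ "}\n\n")))
  defs ++ start ++ funcs

-- ===== PRECONDITION & SPEC =====
def Spec_genLibraryOptimized (board_w : Int) (board_h : Int) (LesSauts : List (Int × Int)) (result : String) (out : String) : Prop := out = genLibraryOptimized_alt board_w board_h LesSauts result
instance (board_w : Int) (board_h : Int) (LesSauts : List (Int × Int)) (result : String) (out : String) : Decidable (Spec_genLibraryOptimized board_w board_h LesSauts result out) := by unfold Spec_genLibraryOptimized; infer_instance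

-- ===== CLAIM (what is proved, stated in full; the proofs are below) =====
def Claim_equal_genLibraryOptimized : Prop := ∀ (board_w : Int) (board_h : Int) (LesSauts : List (Int × Int)) (result : String), Dom_genLibraryOptimized board_w board_h LesSauts result → Spec_genLibraryOptimized board_w board_h LesSauts result (genLibraryOptimized board_w board_h LesSauts result)

-- ===== LEMMAS AND PROOFS =====

theorem sjoin_cons (a : String) (l : List String) : String.join (a :: l) = a ++ String.join l := by
  have key : ∀ (l : List String) (s : String), l.foldl (· ++ ·) s = s ++ String.join l := by
    intro l
    induction l with
    | nil => intro s; simp [String.join]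
    | cons b t ih =>
      intro s
      show List.foldl (· ++ ·) (s ++ b) t = s ++ String.join (b :: t)
      rw [ih]
      have : String.join (b :: t) = List.foldl (· ++ ·) ("" ++ b) t := rfl
      rw [this, ih, String.append_assoc]
      rfl
  have : String.join (a :: l) = List.foldl (· ++ ·) ("" ++ a) l := rfl
  rw [this, key]
  rfl

theorem sfoldl_join {α : Type} (l : List α) (f : α → String) (s : String) :
    l.foldl (fun acc x => acc ++ f x) s = s ++ String.join (l.map f) := by
  induction l generalizing s with
  | nil => simp [String.join]
  | cons a t ih =>
    show List.foldl _ (s ++ f a) t = _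
    rw [ih, List.map_cons, sjoin_cons, String.append_assoc]

theorem pair_foldl {α : Type} (l : List α) (f g : α → String) (p : String × String) :
    l.foldl (fun st x => (st.1 ++ f x, st.2 ++ g x)) p
      = (p.1 ++ String.join (l.map f), p.2 ++ String.join (l.map g)) := by
  induction l generalizing p with
  | nil => simp [String.join]
  | cons a t ih =>
    show List.foldl _ (p.1 ++ f a, p.2 ++ g a) t = _
    rw [ih, List.map_cons, List.map_cons, sjoin_cons, sjoin_cons]
    simp [String.append_assoc]

theorem sjoin_append (a b : List String) : String.join (a ++ b) = String.join a ++ String.join b := by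
  induction a with
  | nil => simp [String.join]
  | cons x t ih => rw [List.cons_append, sjoin_cons, sjoin_cons, ih, String.append_assoc]

theorem sjoin_flatMap {α : Type} (l : List α) (g : α → List String) :
    String.join (l.flatMap g) = String.join (l.map fun x => String.join (g x)) := by
  induction l with
  | nil => rfl
  | cons a t ih => rw [List.flatMap_cons, sjoin_append, ih, List.map_cons, sjoin_cons]

theorem sjoin_singleton (a : String) : String.join [a] = a := by
  rw [sjoin_cons]; simp [String.join]

theorem band_zero_left (n : Int) : PySem.Int.band 0 n = 0 := by
  rw [PySem.Int.band_comm]; exact PySem.Int.band_zero n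

theorem bor_zero_left (n : Int) : PySem.Int.bor 0 n = n := by
  rw [PySem.Int.bor_comm]; exact PySem.Int.bor_zero n

theorem lit_e1 (x : String) : "\tnb_solutions += ((" ++ ("masque & " ++ x) = "\tnb_solutions += ((masque & " ++ x := by
  rw [← String.append_assoc]
  rfl

theorem lit_e2 (x : String) : "u ) == 0 " ++ ("); // " ++ x) = "u ) == 0 ); // " ++ x := by
  rw [← String.append_assoc]
  rfl

theorem lit_e3 (x : String) : "u ) == 0 " ++ (") { // " ++ x) = "u ) == 0 ) { // " ++ x := by
  rw [← String.append_assoc]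
  rfl

theorem lit_e4 (x : String) : "\tif ((" ++ ("masque & " ++ x) = "\tif ((masque & " ++ x := by
  rw [← String.append_assoc]
  rfl

theorem foldl_join_rel {α : Type} (stepA : String → α → String) (stepB : List String → α → List String)
    (hstep : ∀ acc ps s, acc = String.join ps → stepA acc s = String.join (stepB ps s)) :
    ∀ (l : List α) (acc : String) (ps : List String), acc = String.join ps →
      List.foldl stepA acc l = String.join (List.foldl stepB ps l) := by
  intro l
  induction l with
  | nil => intro acc ps h; exact h
  | cons a t ih => intro acc ps h; exact ih _ _ (hstep _ _ _ h)

set_option maxHeartbeats 1000000 in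
theorem genAux_eq_bodyB (w h : Int) (S : List (Int × Int)) (depth i j : Int)
    (hd : depth ≠ w * h - 1) :
    genAux w h S depth 2 0 i j 0 = bodyB w h S depth i j := by
  rw [show (2:Nat) = 1+1 from rfl, bodyB]
  simp only [genAux, add_zero]
  rw [if_neg hd, if_neg (by decide : ¬ ((0:Int) = 1))]
  refine foldl_join_rel _ _ ?_ S "" [] rfl
  intro acc ps s hacc
  dsimp only
  split_ifs
  all_goals try exact hacc
  all_goals try (exact absurd (band_zero_left _) ‹_›)
  all_goals try (exfalso; omega)
  all_goals (rw [hacc, sjoin_append, sjoin_singleton]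
             simp only [bor_zero_left, String.append_assoc, lit_e1, lit_e2, lit_e3, lit_e4])

set_option maxHeartbeats 4000000 in
set_option maxRecDepth 100000 in
theorem genLib_main (board_w board_h : Int) (LesSauts : List (Int × Int)) (result : String) :
    genLibraryOptimized board_w board_h LesSauts result = genLibraryOptimized_alt board_w board_h LesSauts result := by
  simp only [genLibraryOptimized, genLibraryOptimized_alt, cellsB]
  simp only [String.append_assoc]
  simp only [pair_foldl, sfoldl_join]
  simp only [sjoin_flatMap, List.map_flatMap, List.map_map, Function.comp_def]
  simp only [String.append_assoc]
  have hfun : (PySem.List.pyRange 0 (board_w * board_h - 1) 1).map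
      (fun x => String.join (List.map (fun x_1 => String.join (List.map (fun x_2 =>
        "void SauteDepuis_" ++ (PySem.Int.toStr x_2 ++ ("_" ++ (PySem.Int.toStr x_1 ++ ("_" ++
          (PySem.Int.toStr x ++ ("() {" ++ ("\n" ++ (genAux board_w board_h LesSauts x 2 0 x_2 x_1 0 ++ "}\n\n"))))))))
        ) (PySem.List.pyRange 0 board_w 1))) (PySem.List.pyRange 0 board_h 1)))
    = (PySem.List.pyRange 0 (board_w * board_h - 1) 1).map
      (fun x => String.join (List.map (fun x_1 => String.join (List.map (fun x_2 =>
        "void SauteDepuis_" ++ (PySem.Int.toStr x_2 ++ ("_" ++ (PySem.Int.toStr x_1 ++ ("_" ++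
          (PySem.Int.toStr x ++ ("() {" ++ ("\n" ++ (bodyB board_w board_h LesSauts x x_2 x_1 ++ "}\n\n"))))))))
        ) (PySem.List.pyRange 0 board_w 1))) (PySem.List.pyRange 0 board_h 1))) := by
    refine List.map_congr_left ?_
    intro x hx
    have hd : x ≠ board_w * board_h - 1 := by
      have := (PySem.List.mem_pyRange_one).1 hx; omega
    congr 1
    refine List.map_congr_left ?_
    intro x1 _
    congr 1
    refine List.map_congr_left ?_
    intro x2 _
    rw [genAux_eq_bodyB _ _ _ _ _ _ hd]
  rw [hfun]
  rfl

-- ===== VERDICT (by name: the statement is the Claim_ definition above) =====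
theorem genLibraryOptimized_spec : Claim_equal_genLibraryOptimized := by
  intro board_w board_h LesSauts result _
  exact genLib_main board_w board_h LesSauts result
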